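-- pv_equiv track=rewrite | github.com/MrittikaDutta/python_programs | GFG-POTD-25-08/13-Tywin's War Strategy.py | minSoldiers
-- ===== SOURCE A (Python) =====
-- import math
--
-- def minSoldiers(arr, k):
--     # code here
--     n = len(arr)
--     required_lucky_troops = math.ceil(n / 2)
--
--     costs = []
--     for soldiers in arr:
--         if soldiers % k == 0:
--             costs.append(0)
--         else:
--             cost_to_add = k - (soldiers % k)
--             costs.append(cost_to_add)
--
--     costs.sort()
--
--     t = sum(costs[:required_lucky_troops])
--     return t
-- ===== SOURCE B (Python) =====
-- def _sum_smallest(xs, m):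
--     # sum of the m smallest values of xs, by three-way quickselect partitioning
--     if m <= 0:
--         return 0
--     if m >= len(xs):
--         return sum(xs)
--     p = xs[len(xs) // 2]
--     lt = [x for x in xs if x < p]
--     if m <= len(lt):
--         return _sum_smallest(lt, m)
--     eq = sum(1 for x in xs if x == p)
--     if m <= len(lt) + eq:
--         return sum(lt) + p * (m - len(lt))
--     return sum(lt) + p * eq + _sum_smallest([x for x in xs if x > p], m - len(lt) - eq)
--
-- def minSoldiers(arr, k):
--     # cost to lift s to a multiple of k is (-s) % k; sum the smallest ceil(n/2) of them
--     return _sum_smallest([(-s) % k for s in arr], (len(arr) + 1) // 2)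
-- ===== Notes on version B (the rewrite author's own statement) =====
-- stated objective: alternative
-- what changed: B replaces the full sort (build cost list, sort, sum prefix) by a three-way quickselect recursion that sums the smallest ceil(n/2) costs without ever sorting, computing each cost directly as (-s) % k.
import Mathlib
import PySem

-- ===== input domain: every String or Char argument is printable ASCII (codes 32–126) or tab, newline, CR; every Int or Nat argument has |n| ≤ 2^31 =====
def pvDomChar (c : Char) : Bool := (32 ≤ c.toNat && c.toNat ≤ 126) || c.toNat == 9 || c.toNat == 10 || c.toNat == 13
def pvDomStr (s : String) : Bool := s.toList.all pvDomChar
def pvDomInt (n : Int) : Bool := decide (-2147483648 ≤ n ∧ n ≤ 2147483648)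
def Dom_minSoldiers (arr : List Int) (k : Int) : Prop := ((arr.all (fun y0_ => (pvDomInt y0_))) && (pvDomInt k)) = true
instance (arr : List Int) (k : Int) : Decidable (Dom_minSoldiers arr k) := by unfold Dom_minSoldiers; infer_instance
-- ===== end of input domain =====

-- B replaces A's build-sort-sum-prefix by a three-way quickselect recursion that sums the
-- smallest ceil(n/2) costs without sorting, each cost computed directly as (-s) % k.

-- ===== PORT A =====
-- build the cost list in order, sort it, sum its first ceil(n/2) entries
def minSoldiers (arr : List Int) (k : Int) : Int :=
  let n := arr.length
  -- math.ceil(n / 2): exact, since 0 ≤ n ≤ 2^31 makes n/2 an exact float; ceil(n/2) = (n+1)/2 on Nat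
  let required := (n + 1) / 2
  let costs := arr.foldl (fun acc soldiers =>
    if PySem.Int.mod soldiers k = 0 then acc ++ [(0 : Int)]
    else acc ++ [k - PySem.Int.mod soldiers k]) []
  let sortedCosts := PySem.List.sorted costs (fun x => x) false
  (PySem.List.slice sortedCosts none (some (required : Int))).sum

-- ===== PORT B =====
-- elements strictly below / strictly above the pivot (Source B's two comprehensions)
def ltOf (xs : List Int) (p : Int) : List Int := xs.filter (fun x => x < p)
def gtOf (xs : List Int) (p : Int) : List Int := xs.filter (fun x => p < x)

-- termination helper for the quickselect recursion, cited by decreasing_by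
lemma filterOf_length_lt (xs : List Int) (hxs : xs ≠ []) (q : Int → Bool)
    (hq : q (xs.getD (xs.length / 2) 0) = false) :
    (xs.filter q).length < xs.length := by
  have hx : xs.length / 2 < xs.length := by
    have : 0 < xs.length := List.length_pos_of_ne_nil hxs
    omega
  refine List.length_filter_lt_length_iff_exists.mpr
    ⟨xs.getD (xs.length / 2) 0, ?_, by exact hq ▸ (by simp)⟩
  rw [List.getD_eq_getElem _ _ hx]; exact List.getElem_mem hx

-- sum of the m smallest values of xs by three-way quickselect partitioning (Source B's _sum_smallest)
def sumSmallest (xs : List Int) (m : Int) : Int :=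
  if m ≤ 0 then 0
  else if (xs.length : Int) ≤ m then xs.sum
  else
    let p := xs.getD (xs.length / 2) 0
    let lt := ltOf xs p
    if m ≤ (lt.length : Int) then sumSmallest lt m
    else
      let eq : Int := (xs.countP (fun x => x == p) : Int)
      if m ≤ (lt.length : Int) + eq then lt.sum + p * (m - lt.length)
      else lt.sum + p * eq + sumSmallest (gtOf xs p) (m - lt.length - eq)
termination_by xs.length
decreasing_by
  · exact filterOf_length_lt xs (by rintro rfl; simp at *; omega) _ (by simp)
  · exact filterOf_length_lt xs (by rintro rfl; simp at *; omega) _ (by simp)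

def minSoldiers_alt (arr : List Int) (k : Int) : Int :=
  sumSmallest (arr.map (fun s => PySem.Int.mod (-s) k)) (((arr.length + 1) / 2 : Nat) : Int)

-- ===== PRECONDITION & SPEC =====
-- Python raises ZeroDivisionError at 'soldiers % k' when k = 0; nothing else is excluded
def Pre_minSoldiers (arr : List Int) (k : Int) : Prop := k ≠ 0
instance (arr : List Int) (k : Int) : Decidable (Pre_minSoldiers arr k) := by unfold Pre_minSoldiers; infer_instance
def pvWitness_minSoldiers : List Int × Int := ([3, 7, 2, -5], 4)

def Spec_minSoldiers (arr : List Int) (k : Int) (out : Int) : Prop := out = minSoldiers_alt arr k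
instance (arr : List Int) (k : Int) (out : Int) : Decidable (Spec_minSoldiers arr k out) := by unfold Spec_minSoldiers; infer_instance

-- ===== CLAIM (what is proved, stated in full; the proofs are below) =====
def Claim_equal_minSoldiers : Prop := ∀ (arr : List Int) (k : Int), Dom_minSoldiers arr k → Pre_minSoldiers arr k → Spec_minSoldiers arr k (minSoldiers arr k)

-- ===== LEMMAS AND PROOFS =====

-- A's branchy cost equals Python's (-s) % k
lemma pymod_neg (s k : Int) (hk : k ≠ 0) :
    (if PySem.Int.mod s k = 0 then (0 : Int) else k - PySem.Int.mod s k) = PySem.Int.mod (-s) k := by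
  have h1 := PySem.Int.floordiv_mul_add_mod s k
  have h2 := PySem.Int.floordiv_mul_add_mod (-s) k
  set a := PySem.Int.mod s k with ha
  set b := PySem.Int.mod (-s) k with hb
  have hkey : a + b = (-(PySem.Int.floordiv s k + PySem.Int.floordiv (-s) k)) * k := by
    ring_nf; linarith
  set c := -(PySem.Int.floordiv s k + PySem.Int.floordiv (-s) k) with hc
  rcases lt_or_gt_of_ne hk with hneg | hpos
  · have ba := PySem.Int.mod_neg_bounds (a := s) hneg
    have bb := PySem.Int.mod_neg_bounds (a := -s) hneg
    have hc0 : 0 ≤ c := by nlinarith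
    have hc2 : c < 2 := by nlinarith
    interval_cases c <;> split_ifs with h <;> omega
  · have ba1 := PySem.Int.mod_nonneg (a := s) hpos
    have ba2 := PySem.Int.mod_lt (a := s) hpos
    have bb1 := PySem.Int.mod_nonneg (a := -s) hpos
    have bb2 := PySem.Int.mod_lt (a := -s) hpos
    have hc0 : 0 ≤ c := by nlinarith
    have hc2 : c < 2 := by nlinarith
    interval_cases c <;> split_ifs with h <;> omega

-- A's cost-building loop builds the mapped cost list
lemma costs_eq (arr : List Int) (k : Int) (hk : k ≠ 0) :
    arr.foldl (fun acc soldiers =>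
      if PySem.Int.mod soldiers k = 0 then acc ++ [(0 : Int)]
      else acc ++ [k - PySem.Int.mod soldiers k]) []
    = arr.map (fun s => PySem.Int.mod (-s) k) := by
  have h : ∀ (acc : List Int), ∀ x ∈ arr,
      (if PySem.Int.mod x k = 0 then acc ++ [(0:Int)] else acc ++ [k - PySem.Int.mod x k])
      = acc ++ [PySem.Int.mod (-x) k] := fun acc x _ => by rw [← pymod_neg x k hk]; split <;> rfl
  refine (PySem.List.foldl_congr_mem _ _ _ _ h).trans ?_
  simpa using PySem.List.foldl_append_singleton_eq_map (f := fun s => PySem.Int.mod (-s) k) (l := arr) (acc := [])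

-- the three-way partition around a pivot is a permutation of the list
lemma partition3_perm (ys : List Int) (p : Int) :
    (ys.filter (fun x => x < p) ++ (List.replicate (ys.count p) p ++ ys.filter (fun x => p < x))).Perm ys := by
  induction ys with
  | nil => simp
  | cons y t ih =>
    rcases lt_trichotomy y p with h | h | h
    · have hne : ¬ y = p := by omega
      simpa [List.filter_cons, h, List.count_cons, hne, not_lt.mpr h.le] using ih.cons y
    · subst h
      simp only [List.filter_cons, List.count_cons_self, lt_irrefl, decide_false,
        List.replicate_succ]
      exact (List.perm_middle).trans (ih.cons y)
    · simp only [List.filter_cons, List.count_cons, decide_eq_true_eq, if_neg (not_lt.mpr h.le),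
        if_pos h, beq_iff_eq, if_neg (by omega : ¬ y = p)]
      refine (List.Perm.trans ?_ (ih.cons y))
      rw [← List.append_assoc, ← List.append_assoc]
      exact List.perm_middle

-- a sorted list decomposes around any pivot into below / equal / above blocks
lemma sorted_decomp (ys : List Int) (p : Int) :
    PySem.List.sorted ys (fun x => x) false =
      PySem.List.sorted (ltOf ys p) (fun x => x) false
      ++ (List.replicate (ys.count p) p
      ++ PySem.List.sorted (gtOf ys p) (fun x => x) false) := by
  unfold ltOf gtOf
  set L := PySem.List.sorted (ys.filter (fun x => x < p)) (fun x => x) false with hL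
  set G := PySem.List.sorted (ys.filter (fun x => p < x)) (fun x => x) false with hG
  have hmemL : ∀ x ∈ L, x < p := by
    intro x hx
    have := (PySem.List.mem_sorted _ _ _ _).mp hx
    simpa using (List.of_mem_filter this)
  have hmemG : ∀ x ∈ G, p < x := by
    intro x hx
    have := (PySem.List.mem_sorted _ _ _ _).mp hx
    simpa using (List.of_mem_filter this)
  have hperm : (L ++ (List.replicate (ys.count p) p ++ G)).Perm ys := by
    refine List.Perm.trans ?_ (partition3_perm ys p)
    exact ((PySem.List.sorted_perm _ _ _).append ((List.Perm.refl _).append (PySem.List.sorted_perm _ _ _)))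
  have hsorted : (L ++ (List.replicate (ys.count p) p ++ G)).Pairwise (· ≤ ·) := by
    rw [List.pairwise_append]
    refine ⟨by simpa using PySem.List.sorted_pairwise (xs := ys.filter (fun x => x < p)) (key := fun x => x), ?_, ?_⟩
    · rw [List.pairwise_append]
      refine ⟨List.pairwise_replicate.mpr (by simp),
        by simpa using PySem.List.sorted_pairwise (xs := ys.filter (fun x => p < x)) (key := fun x => x), ?_⟩
      intro a ha b hb
      have := List.eq_of_mem_replicate ha
      exact le_of_lt (this ▸ hmemG b hb)
    · intro a ha b hb
      rcases List.mem_append.mp hb with hb | hb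
      · exact le_of_lt ((List.eq_of_mem_replicate hb) ▸ hmemL a ha)
      · exact le_of_lt ((hmemL a ha).trans (hmemG b hb))
  have hsorted' : (PySem.List.sorted ys (fun x => x) false).Pairwise (· ≤ ·) := by
    simpa using PySem.List.sorted_pairwise (xs := ys) (key := fun x => x)
  exact ((PySem.List.sorted_perm _ _ _).trans hperm.symm).eq_of_pairwise
    (fun a b _ _ h1 h2 => le_antisymm h1 h2) hsorted' hsorted

-- the quickselect sum equals the sum of the m-prefix of the sorted list
lemma sumSmallest_eq (xs : List Int) (m : Int) :
    sumSmallest xs m = ((PySem.List.sorted xs (fun x => x) false).take m.toNat).sum := by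
  induction xs, m using sumSmallest.induct with
  | case1 xs m h =>
    rw [sumSmallest]
    simp [h, show m.toNat = 0 by omega]
  | case2 xs m h h2 =>
    rw [sumSmallest]
    rw [if_neg h, if_pos h2]
    rw [List.take_of_length_le (by rw [PySem.List.length_sorted]; omega)]
    exact ((PySem.List.sorted_perm _ _ _).sum_eq).symm
  | case3 xs m h h2 p lt hlt ih =>
    rw [sumSmallest]
    rw [if_neg h, if_neg h2]
    simp only [lt, p] at hlt ih ⊢
    rw [if_pos hlt, ih, sorted_decomp xs (xs.getD (xs.length / 2) 0)]
    rw [List.take_append]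
    have hlen := PySem.List.length_sorted (ltOf xs (xs.getD (xs.length / 2) 0)) (fun x : Int => x) false
    rw [show m.toNat - (PySem.List.sorted (ltOf xs (xs.getD (xs.length / 2) 0)) (fun x => x) false).length = 0 by omega]
    simp
  | case4 xs m h h2 p lt hlt eq heq =>
    rw [sumSmallest]
    rw [if_neg h, if_neg h2]
    simp only [lt, p, eq] at hlt heq ⊢
    rw [if_neg hlt, if_pos heq, sorted_decomp xs (xs.getD (xs.length / 2) 0)]
    set q := xs.getD (xs.length / 2) 0 with hq
    set L := PySem.List.sorted (ltOf xs q) (fun x => x) false with hLdef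
    have hlen : L.length = (ltOf xs q).length := PySem.List.length_sorted _ _ _
    have hcnt : xs.count q = xs.countP (fun x => x == q) := rfl
    rw [List.take_append, List.take_of_length_le (by omega), List.take_append]
    rw [List.take_replicate, List.length_replicate,
        show m.toNat - L.length - xs.count q = 0 by omega, List.take_zero]
    have hmin : min (m.toNat - L.length) (xs.count q) = m.toNat - L.length := by omega
    rw [hmin]
    have hsumL : L.sum = (ltOf xs q).sum := (PySem.List.sorted_perm _ _ _).sum_eq
    have hcast : ((m.toNat - L.length : Nat) : Int) = m - ((ltOf xs q).length : Int) := by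
      push_cast [hlen]; omega
    simp [hsumL, List.sum_replicate, hcast]
    ring
  | case5 xs m h h2 p lt hlt eq heq ih =>
    rw [sumSmallest]
    rw [if_neg h, if_neg h2]
    simp only [lt, p, eq] at hlt heq ih ⊢
    rw [if_neg hlt, if_neg heq, sorted_decomp xs (xs.getD (xs.length / 2) 0)]
    set q := xs.getD (xs.length / 2) 0 with hq
    set L := PySem.List.sorted (ltOf xs q) (fun x => x) false with hLdef
    have hlen : L.length = (ltOf xs q).length := PySem.List.length_sorted _ _ _
    have hcnt : xs.count q = xs.countP (fun x => x == q) := rfl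
    rw [List.take_append, List.take_of_length_le (l := L) (i := m.toNat) (by omega),
        List.take_append,
        List.take_of_length_le (l := List.replicate (xs.count q) q)
          (by simp only [List.length_replicate]; omega)]
    have hsumL : L.sum = (ltOf xs q).sum := (PySem.List.sorted_perm _ _ _).sum_eq
    have harg : (m - ((ltOf xs q).length : Int) - (xs.countP (fun x => x == q) : Int)).toNat
        = m.toNat - L.length - (List.replicate (xs.count q) q).length := by
      simp only [List.length_replicate, hlen, hcnt]; omega
    rw [ih, harg]
    simp [hsumL, List.sum_replicate, hcnt]
    ring

-- ===== VERDICT (by name: the statement is the Claim_ definition above) =====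
theorem minSoldiers_spec : Claim_equal_minSoldiers := by
  intro arr k _ hk
  unfold Spec_minSoldiers minSoldiers minSoldiers_alt
  simp only
  rw [costs_eq arr k hk, PySem.List.slice_to_natCast, sumSmallest_eq]
  rw [Int.toNat_natCast]
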